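-- pv_equiv track=rewrite | github.com/TheGigaChat/Python-challenges | OP/op08_pyramids/pyramids.py | create_number_pyramid_right_down
-- ===== SOURCE A (Python) =====
-- def create_number_pyramid_right_down(height: int, i=1) -> str:
--     """
--     Create right-aligned number pyramid upside-down.
--
--     1234
--      123
--       12
--        1
--
--     Use recursion!
--
--     :param height: Pyramid height.
--     :param current: Keeping track of current layer.
--     :return: Pyramid.
--     """
--     margin_coefficient = 0
--     concat_sum = ""
--     for n in range(1, height + 1):
--         concat_sum += str(n)
--         if n == height:
--             margin_coefficient = len(str(n))
--
--     if height > 0: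
--         whitespaces = " " * (i - 1)
--         if whitespaces == "":
--             return concat_sum + create_number_pyramid_right_down(height - 1, i + margin_coefficient)
--         else:
--             return "\n" + whitespaces + concat_sum + create_number_pyramid_right_down(height - 1, i + margin_coefficient)
--     else:
--         return ""
-- ===== SOURCE B (Python) =====
-- def create_number_pyramid_right_down(height: int, i=1) -> str:
--     """Iterative version: one loop from the widest layer down, threading the indent."""
--     out = ""
--     for k in range(height, 0, -1):
--         row = "".join(str(n) for n in range(1, k + 1))
--         ws = " " * (i - 1)
--         out += row if ws == "" else "\n" + ws + row
--         i += len(str(k))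
--     return out
-- ===== Notes on version B (the rewrite author's own statement) =====
-- stated objective: faster
-- what changed: Replaced A's recursion (one Python call per layer, each rebuilding its row with character-by-character += and deriving the margin step inside that loop) by a single iterative loop from the widest layer down that threads the indentation counter, builds each row with ''.join and appends it to an accumulator.
import Mathlib
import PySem

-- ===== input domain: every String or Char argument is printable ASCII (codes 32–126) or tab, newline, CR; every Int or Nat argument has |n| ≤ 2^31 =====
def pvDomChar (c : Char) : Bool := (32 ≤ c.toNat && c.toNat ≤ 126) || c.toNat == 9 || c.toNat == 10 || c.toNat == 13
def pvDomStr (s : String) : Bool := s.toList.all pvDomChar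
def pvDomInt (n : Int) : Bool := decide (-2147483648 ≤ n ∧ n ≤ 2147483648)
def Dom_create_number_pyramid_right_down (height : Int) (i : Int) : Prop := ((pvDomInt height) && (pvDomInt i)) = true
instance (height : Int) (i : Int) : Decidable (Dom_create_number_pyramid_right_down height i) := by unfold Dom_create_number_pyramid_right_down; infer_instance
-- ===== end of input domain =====

-- B replaces A's per-layer recursion by one loop from the widest layer down that threads the
-- indentation counter and joins each row once (objective: faster by a constant factor, measured).

-- ===== PORT A =====
-- step of A's 'for n in range(1, height + 1)' loop; state = (margin_coefficient, concat_sum)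
def pvAStep (height : Int) (p : Int × List Char) (n : Int) : Int × List Char :=
  (if n == height then ((PySem.Int.toChars n).length : Int) else p.1,
   p.2 ++ PySem.Int.toChars n)

def pvA_chars (height : Int) (i : Int) : List Char :=
  let p := (PySem.List.pyRange 1 (height + 1) 1).foldl (pvAStep height) (0, [])
  if _h : height > 0 then
    let ws := List.replicate (i - 1).toNat ' '
    if ws = [] then p.2 ++ pvA_chars (height - 1) (i + p.1)
    else '\n' :: (ws ++ p.2 ++ pvA_chars (height - 1) (i + p.1))
  else []
termination_by height.toNat
decreasing_by all_goals omega

def create_number_pyramid_right_down (height : Int) (i : Int) : String :=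
  String.ofList (pvA_chars height i)

-- ===== PORT B =====
-- step of B's 'for k in range(height, 0, -1)' loop; state = (i, out)
def pvBStep (st : Int × List Char) (k : Int) : Int × List Char :=
  let row := PySem.Chars.join [] ((PySem.List.pyRange 1 (k + 1) 1).map PySem.Int.toChars)
  let ws := List.replicate (st.1 - 1).toNat ' '
  (st.1 + ((PySem.Int.toChars k).length : Int),
   st.2 ++ (if ws = [] then row else '\n' :: (ws ++ row)))

def pvB_chars (height : Int) (i : Int) : List Char :=
  ((PySem.List.pyRange height 0 (-1)).foldl pvBStep (i, [])).2

def create_number_pyramid_right_down_alt (height : Int) (i : Int) : String :=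
  String.ofList (pvB_chars height i)

-- ===== PRECONDITION & SPEC =====
def Spec_create_number_pyramid_right_down (height : Int) (i : Int) (out : String) : Prop := out = create_number_pyramid_right_down_alt height i
instance (height : Int) (i : Int) (out : String) : Decidable (Spec_create_number_pyramid_right_down height i out) := by unfold Spec_create_number_pyramid_right_down; infer_instance

-- ===== CLAIM (what is proved, stated in full; the proofs are below) =====
def Claim_equal_create_number_pyramid_right_down : Prop := ∀ (height : Int) (i : Int), Dom_create_number_pyramid_right_down height i → Spec_create_number_pyramid_right_down height i (create_number_pyramid_right_down height i)

-- ===== LEMMAS AND PROOFS =====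

-- ''.join over a list of chunks is flatten
theorem pvJoinNil (L : List (List Char)) : PySem.Chars.join [] L = L.flatten := by
  simp only [PySem.Chars.join, List.intercalate]
  induction L with
  | nil => simp
  | cons a t ih => cases t <;> simp_all [List.intersperse]

-- characterisation of A's counting loop over any list of layer numbers
theorem pvAFold (height : Int) (L : List Int) (m : Int) (s : List Char) :
    L.foldl (pvAStep height) (m, s) =
      (if height ∈ L then ((PySem.Int.toChars height).length : Int) else m,
       s ++ (L.map PySem.Int.toChars).flatten) := by
  induction L generalizing m s with
  | nil => simp
  | cons a t ih =>
    simp only [List.foldl_cons, pvAStep, ih]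
    by_cases h2 : a = height
    · subst h2; simp
    · have h3 : height ≠ a := Ne.symm h2
      simp [h2, h3, beq_iff_eq]

-- one unfolding of A at a positive height
theorem pvA_pos (height : Int) (i : Int) (h : 0 < height) :
    pvA_chars height i =
      (let row := ((PySem.List.pyRange 1 (height + 1) 1).map PySem.Int.toChars).flatten
       let ws := List.replicate (i - 1).toNat ' '
       let rest := pvA_chars (height - 1) (i + ((PySem.Int.toChars height).length : Int))
       if ws = [] then row ++ rest else '\n' :: (ws ++ row ++ rest)) := by
  rw [pvA_chars]
  have hmem : height ∈ PySem.List.pyRange 1 (height + 1) 1 :=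
    PySem.List.mem_pyRange_one.mpr ⟨by omega, by omega⟩
  simp only [pvAFold, hmem, if_pos, gt_iff_lt, h, dite_true, List.nil_append]

-- B's loop, started at any accumulator, appends exactly A's value
theorem pvLoop (n : Nat) (height : Int) (hn : height ≤ n) (i : Int) (acc : List Char) :
    ((PySem.List.pyRange height 0 (-1)).foldl pvBStep (i, acc)).2 =
      acc ++ pvA_chars height i := by
  induction n generalizing height i acc with
  | zero =>
    rw [PySem.List.pyRange_neg_one_eq_nil (by exact_mod_cast hn), pvA_chars]
    simp [show ¬ height > 0 by omega]
  | succ n ih =>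
    by_cases h : 0 < height
    · rw [PySem.List.pyRange_neg_one_cons h]
      simp only [List.foldl_cons]
      rw [show pvBStep (i, acc) height =
            (i + ((PySem.Int.toChars height).length : Int),
             acc ++ (let row := ((PySem.List.pyRange 1 (height + 1) 1).map PySem.Int.toChars).flatten
                     let ws := List.replicate (i - 1).toNat ' '
                     if ws = [] then row else '\n' :: (ws ++ row))) by
            simp [pvBStep, pvJoinNil]]
      rw [ih (height - 1) (by omega)]
      rw [pvA_pos height i h]
      simp only []
      split_ifs <;> simp
    · rw [PySem.List.pyRange_neg_one_eq_nil (by omega), pvA_chars]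
      simp [show ¬ height > 0 by omega]

-- ===== VERDICT (by name: the statement is the Claim_ definition above) =====
theorem create_number_pyramid_right_down_spec : Claim_equal_create_number_pyramid_right_down := by
  intro height i _
  unfold Spec_create_number_pyramid_right_down
  unfold create_number_pyramid_right_down create_number_pyramid_right_down_alt pvB_chars
  rw [pvLoop height.toNat height (Int.self_le_toNat height) i []]
  simp
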